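-- pv_equiv track=rewrite | github.com/samm82/CodewordSolver | src/Process.py | __extractFromRow
-- ===== SOURCE A (Python) =====
-- def __extractFromRow(lst):
--     wordsList = []
--     word = []
--
--     for i in range(len(lst)):
--         char = lst[i]
--         if char == '' and len(word) < 2:
--             word = []
--         elif char == '':
--             if word != []:
--                 wordsList.append(word)
--                 word = []
--         elif i == len(lst) - 1:
--             word.append(char.lower())
--             if len(word) > 1:
--                 wordsList.append(word)
--                 word = []
--         else:
--             word.append(char.lower())
--
--     return wordsList
-- ===== SOURCE B (Python) =====
-- def __extractFromRow(lst):
--     # Pass 1: split lst into chunks at every '' delimiter (chunks may be empty).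
--     runs = []
--     cur = []
--     for t in lst:
--         if t == '':
--             runs.append(cur)
--             cur = []
--         else:
--             cur.append(t)
--     runs.append(cur)
--     # Pass 2: lowercase every token of every run.
--     words = [[c.lower() for c in r] for r in runs]
--     # Pass 3: keep only words longer than one token.
--     return [w for w in words if len(w) > 1]
-- ===== Notes on version B (the rewrite author's own statement) =====
-- stated objective: simpler
-- what changed: Replaces A's single-pass flush-on-delimiter state machine (with a special case for the last index) with a three-stage decomposition: split into runs at '' delimiters, lowercase each run, then filter words of length > 1.
import Mathlib
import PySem

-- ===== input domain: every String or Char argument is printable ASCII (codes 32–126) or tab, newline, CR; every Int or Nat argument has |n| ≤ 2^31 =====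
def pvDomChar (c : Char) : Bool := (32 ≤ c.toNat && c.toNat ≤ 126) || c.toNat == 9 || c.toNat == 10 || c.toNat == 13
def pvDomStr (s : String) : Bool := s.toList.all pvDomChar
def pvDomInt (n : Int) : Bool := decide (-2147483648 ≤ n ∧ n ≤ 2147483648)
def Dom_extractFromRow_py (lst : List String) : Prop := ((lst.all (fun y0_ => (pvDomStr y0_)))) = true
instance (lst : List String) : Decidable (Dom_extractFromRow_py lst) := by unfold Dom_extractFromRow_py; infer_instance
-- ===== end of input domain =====

-- B splits lst into runs at '' delimiters, lowercases, then filters length > 1 (same value as A, different decomposition).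

-- ===== PORT A =====
-- the loop body of A; `ts = []` transcribes `i == len(lst) - 1` (this is the last element)
def extractFromRow_goA : List String → List (List String) → List String → List (List String)
  | [], wordsList, _ => wordsList
  | c :: ts, wordsList, word =>
    if c = "" ∧ word.length < 2 then
      extractFromRow_goA ts wordsList []
    else if c = "" then
      (if word ≠ [] then extractFromRow_goA ts (wordsList ++ [word]) []
       else extractFromRow_goA ts wordsList word)
    else if ts = [] then
      (let word' := word ++ [PySem.Str.lower c]
       if word'.length > 1 then extractFromRow_goA ts (wordsList ++ [word']) []
       else extractFromRow_goA ts wordsList word')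
    else
      extractFromRow_goA ts wordsList (word ++ [PySem.Str.lower c])

def extractFromRow_py (lst : List String) : List (List String) :=
  extractFromRow_goA lst [] []

-- ===== PORT B =====
def extractFromRow_py_alt (lst : List String) : List (List String) :=
  let st := lst.foldl
    (fun (st : List (List String) × List String) t =>
      if t = "" then (st.1 ++ [st.2], []) else (st.1, st.2 ++ [t]))
    ([], [])
  let runs := st.1 ++ [st.2]
  let words := runs.map (fun r => r.map PySem.Str.lower)
  words.filter (fun w => w.length > 1)

-- ===== PRECONDITION & SPEC =====
def Spec_extractFromRow_py (lst : List String) (out : List (List String)) : Prop := out = extractFromRow_py_alt lst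
instance (lst : List String) (out : List (List String)) : Decidable (Spec_extractFromRow_py lst out) := by unfold Spec_extractFromRow_py; infer_instance

-- ===== CLAIM (what is proved, stated in full; the proofs are below) =====
def Claim_equal_extractFromRow_py : Prop := ∀ (lst : List String), Dom_extractFromRow_py lst → Spec_extractFromRow_py lst (extractFromRow_py lst)

-- ===== LEMMAS AND PROOFS =====

-- ===== VERDICT (by name: the statement is the Claim_ definition above) =====
-- raw runs of lst split at '' with pending chunk cur (B's pass 1, as recursion)
def rawRuns (cur : List String) : List String → List (List String)
  | [] => [cur]
  | c :: ts => if c = "" then cur :: rawRuns [] ts else rawRuns (cur ++ [c]) ts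

-- lowered runs (what A builds incrementally)
def lowRuns (word : List String) : List String → List (List String)
  | [] => [word]
  | c :: ts => if c = "" then word :: lowRuns [] ts
               else lowRuns (word ++ [PySem.Str.lower c]) ts

theorem foldB_eq (lst : List String) : ∀ (runs : List (List String)) (cur : List String),
    (let st := lst.foldl
      (fun (st : List (List String) × List String) t =>
        if t = "" then (st.1 ++ [st.2], []) else (st.1, st.2 ++ [t]))
      (runs, cur)
     st.1 ++ [st.2]) = runs ++ rawRuns cur lst := by
  induction lst with
  | nil => intro runs cur; simp [rawRuns]
  | cons c ts ih =>
    intro runs cur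
    by_cases h : c = "" <;> simp [List.foldl, h, rawRuns, ih]

theorem mapLower_rawRuns (lst : List String) : ∀ (cur : List String),
    (rawRuns cur lst).map (fun r => r.map PySem.Str.lower)
      = lowRuns (cur.map PySem.Str.lower) lst := by
  induction lst with
  | nil => intro cur; simp [rawRuns, lowRuns]
  | cons c ts ih =>
    intro cur
    by_cases h : c = "" <;> simp [rawRuns, lowRuns, h, ih]

theorem goA_eq (lst : List String) : lst ≠ [] →
    ∀ (wordsList : List (List String)) (word : List String),
    extractFromRow_goA lst wordsList word
      = wordsList ++ (lowRuns word lst).filter (fun w => w.length > 1) := by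
  induction lst with
  | nil => intro h; exact absurd rfl h
  | cons c ts ih =>
    intro _ wordsList word
    by_cases hc : c = ""
    · by_cases hlen : word.length < 2
      · rcases eq_or_ne ts [] with hts | hts
        · subst hts
          have hw : ¬ word.length > 1 := by omega
          simp [extractFromRow_goA, hc, hlen, lowRuns, hw]
        · have hw : ¬ word.length > 1 := by omega
          simp [extractFromRow_goA, hc, hlen, lowRuns, hw, ih hts]
      · have hne : word ≠ [] := by
          intro h; subst h; simp at hlen
        have hw : word.length > 1 := by omega
        rcases eq_or_ne ts [] with hts | hts
        · subst hts
          simp [extractFromRow_goA, hc, hlen, hne, lowRuns, hw]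
        · simp [extractFromRow_goA, hc, hlen, hne, lowRuns, hw, ih hts]
    · rcases eq_or_ne ts [] with hts | hts
      · subst hts
        by_cases h0 : 0 < word.length
        · simp [extractFromRow_goA, hc, lowRuns, h0]
        · simp [extractFromRow_goA, hc, lowRuns, h0]
      · simp [extractFromRow_goA, hc, hts, lowRuns, ih hts]

theorem extractFromRow_py_spec : Claim_equal_extractFromRow_py := by
  intro lst _
  show extractFromRow_py lst = extractFromRow_py_alt lst
  rcases eq_or_ne lst [] with h | h
  · subst h; decide
  · simp only [extractFromRow_py, extractFromRow_py_alt, goA_eq lst h, foldB_eq,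
      List.nil_append, mapLower_rawRuns, List.map_nil]
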